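-- pv_equiv track=rewrite | github.com/dgoodlad/flexihal-firmware-builder | scripts/generate_pio_config.py | detect_networking
-- ===== SOURCE A (Python) =====
-- def detect_networking(symbols):
--     """Detect which networking stack to use based on symbols."""
--     symbol_names = {s.split("=")[0] for s in symbols}
--     has_wizchip = "_WIZCHIP_" in symbol_names
--     has_ethernet = "ETHERNET_ENABLE" in symbol_names
--
--     if has_wizchip:
--         return "wiznet"
--     elif has_ethernet:
--         return "eth"
--     return None
-- ===== SOURCE B (Python) =====
-- NET_STACKS = [("_WIZCHIP_", "wiznet"), ("ETHERNET_ENABLE", "eth")]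
--
--
-- def detect_networking(symbols):
--     """Detect which networking stack to use based on symbols."""
--     best = None
--     for s in symbols:
--         name = s.split("=")[0]
--         for i, (key, _stack) in enumerate(NET_STACKS):
--             if name == key and (best is None or i < best):
--                 best = i
--     return None if best is None else NET_STACKS[best][1]
-- ===== Notes on version B (the rewrite author's own statement) =====
-- stated objective: alternative
-- what changed: Replaces building a set of symbol names plus two membership lookups with a single table-driven pass over the symbols that maintains the minimum priority index of any matching stack in an accumulator, then maps that index back through the table.
import Mathlib
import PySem

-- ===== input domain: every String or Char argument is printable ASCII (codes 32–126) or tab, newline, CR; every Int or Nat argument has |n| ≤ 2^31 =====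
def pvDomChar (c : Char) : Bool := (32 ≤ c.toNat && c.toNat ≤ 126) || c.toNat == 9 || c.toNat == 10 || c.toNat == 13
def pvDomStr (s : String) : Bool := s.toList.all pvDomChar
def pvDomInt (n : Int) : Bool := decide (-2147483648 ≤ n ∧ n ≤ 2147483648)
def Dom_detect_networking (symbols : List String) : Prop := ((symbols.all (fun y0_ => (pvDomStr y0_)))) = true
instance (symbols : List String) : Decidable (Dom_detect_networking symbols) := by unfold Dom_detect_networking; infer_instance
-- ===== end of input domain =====

-- B replaces A's set-of-names plus two membership lookups by one table-driven pass keeping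
-- the minimum matching priority index in an accumulator (alternative decomposition).

-- s.split("=")[0], shared Python primitive of both ports: split? with "=" is always some,
-- and the split list is never empty, so the getD/headD defaults are unreachable (exact).
def pvFirstField (s : String) : String := ((PySem.Str.split? s "=").getD []).headD ""

-- ===== PORT A =====
def detect_networking (symbols : List String) : Option String :=
  let symbol_names : PySem.Set String := PySem.Set.ofList (symbols.map pvFirstField)
  let has_wizchip := PySem.Set.contains symbol_names "_WIZCHIP_"
  let has_ethernet := PySem.Set.contains symbol_names "ETHERNET_ENABLE"
  if has_wizchip then some "wiznet"
  else if has_ethernet then some "eth"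
  else none

-- ===== PORT B =====
-- NET_STACKS, B's module-level priority table
def netStacks : List (String × String) := [("_WIZCHIP_", "wiznet"), ("ETHERNET_ENABLE", "eth")]

-- the inner 'for i, (key, _stack) in enumerate(NET_STACKS)' loop body for one symbol name
def netStep (best : Option Int) (name : String) : Option Int :=
  (PySem.List.enumerate netStacks).foldl
    (fun b it =>
      if name == it.2.1 && (b.isNone || decide (it.1 < b.getD 0)) then some it.1 else b)
    best

def detect_networking_alt (symbols : List String) : Option String :=
  let best := symbols.foldl (fun b s => netStep b (pvFirstField s)) none
  match best with
  | none => none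
  -- NET_STACKS[best][1]: best is always a valid index, so the getD default is unreachable
  | some i => some ((PySem.List.pyGet? netStacks i).getD ("", "")).2

-- ===== PRECONDITION & SPEC =====
def Spec_detect_networking (symbols : List String) (out : Option String) : Prop := out = detect_networking_alt symbols
instance (symbols : List String) (out : Option String) : Decidable (Spec_detect_networking symbols out) := by unfold Spec_detect_networking; infer_instance

-- ===== CLAIM (what is proved, stated in full; the proofs are below) =====
def Claim_equal_detect_networking : Prop := ∀ (symbols : List String), Dom_detect_networking symbols → Spec_detect_networking symbols (detect_networking symbols)

-- ===== LEMMAS AND PROOFS =====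

-- membership in the set of first split fields = an any-scan over symbols
theorem contains_ofList_map_eq_any (l : List String) (f : String → String) (x : String) :
    PySem.Set.contains (PySem.Set.ofList (l.map f)) x = l.any (fun s => f s == x) := by
  have h1 : PySem.Set.contains (PySem.Set.ofList (l.map f)) x = true ↔ x ∈ l.map f := by
    simp [PySem.Set.contains, PySem.Set.mem_ofList]
  have h2 : l.any (fun s => f s == x) = true ↔ x ∈ l.map f := by
    simp [List.any_eq_true, beq_iff_eq, List.mem_map]
  by_cases h : x ∈ l.map f
  · rw [h1.mpr h, h2.mpr h]
  · rw [Bool.eq_false_iff.mpr (fun c => h (h1.mp c)), Bool.eq_false_iff.mpr (fun c => h (h2.mp c))]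

-- the accumulator only ever holds none, some 0 or some 1
def okBest (b : Option Int) : Prop := b = none ∨ b = some 0 ∨ b = some 1

-- one step of B's outer loop, characterised
theorem netStep_eq (b : Option Int) (hb : okBest b) (name : String) :
    netStep b name =
      if name = "_WIZCHIP_" then some 0
      else if name = "ETHERNET_ENABLE" then (if b = none then some 1 else b)
      else b := by
  rcases hb with rfl | rfl | rfl <;>
    by_cases h1 : name = "_WIZCHIP_" <;> by_cases h2 : name = "ETHERNET_ENABLE" <;>
    simp_all [netStep, netStacks, PySem.List.enumerate]

-- the whole fold, characterised by the two any-scans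
theorem fold_netStep_eq (l : List String) : ∀ (b : Option Int), okBest b →
    l.foldl (fun b s => netStep b (pvFirstField s)) b =
      (if b = some 0 ∨ l.any (fun s => pvFirstField s == "_WIZCHIP_") then some 0
       else if b = some 1 ∨ l.any (fun s => pvFirstField s == "ETHERNET_ENABLE") then some 1
       else none) := by
  induction l with
  | nil =>
    intro b hb
    rcases hb with rfl | rfl | rfl <;> simp
  | cons s l ih =>
    intro b hb
    have i0 := ih (some 0) (Or.inr (Or.inl rfl))
    have i1 := ih (some 1) (Or.inr (Or.inr rfl))
    have inn := ih none (Or.inl rfl)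
    simp only [List.foldl_cons, netStep_eq b hb, List.any_cons]
    by_cases h1 : pvFirstField s = "_WIZCHIP_" <;> by_cases h2 : pvFirstField s = "ETHERNET_ENABLE" <;>
      rcases hb with rfl | rfl | rfl <;> simp_all

-- ===== VERDICT (by name: the statement is the Claim_ definition above) =====
theorem detect_networking_spec : Claim_equal_detect_networking := by
  intro symbols _
  unfold Spec_detect_networking detect_networking detect_networking_alt
  simp only [contains_ofList_map_eq_any, fold_netStep_eq symbols none (Or.inl rfl)]
  by_cases hw : symbols.any (fun s => pvFirstField s == "_WIZCHIP_") <;>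
    by_cases he : symbols.any (fun s => pvFirstField s == "ETHERNET_ENABLE") <;>
    simp [hw, he, netStacks, PySem.List.pyGet?, PySem.List.pyIdx?]
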